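-- pv_equiv track=rewrite | github.com/lemire/exactshortlib | examples/piproduct.py | select_top_digits
-- ===== SOURCE A (Python) =====
-- def select_top_digits(value, digits, base):
--     if digits <= 0:
--         raise ValueError("number of digits should be a positive integer")
--     while value < base ** (digits-1):
--         value *= base
--     while value >= base ** digits:
--         value //=base
--     return value
-- ===== SOURCE B (Python) =====
-- def select_top_digits(value, digits, base):
--     if digits <= 0:
--         raise ValueError("number of digits should be a positive integer")
--     n = 0
--     v = value
--     while v > 0:
--         v //= base
--         n += 1
--     if n <= digits:
--         return value * base ** (digits - n)
--     else:
--         return value // base ** (n - digits)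
-- ===== Notes on version B (the rewrite author's own statement) =====
-- stated objective: faster
-- what changed: Replace A's two rescaling loops (each iteration recomputes base**(digits-1) and multiplies/divides by base once) by counting value's digits once and applying a single scaling by base**|digits-n|.
-- outside the precondition, e.g. on select_top_digits(5, 1, -2): A returns -3, B returns 5
import Mathlib
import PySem

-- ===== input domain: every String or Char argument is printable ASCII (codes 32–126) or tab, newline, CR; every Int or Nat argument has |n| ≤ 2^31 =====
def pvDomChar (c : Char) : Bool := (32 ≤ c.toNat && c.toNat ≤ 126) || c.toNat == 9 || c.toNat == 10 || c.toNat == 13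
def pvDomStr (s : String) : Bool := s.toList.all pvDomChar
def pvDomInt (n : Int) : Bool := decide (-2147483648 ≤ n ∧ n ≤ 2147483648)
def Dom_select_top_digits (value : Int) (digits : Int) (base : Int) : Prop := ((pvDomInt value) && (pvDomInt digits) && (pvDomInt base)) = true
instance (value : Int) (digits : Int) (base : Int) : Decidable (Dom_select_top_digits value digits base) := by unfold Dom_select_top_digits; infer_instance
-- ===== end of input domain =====

-- B counts value's digits once and applies a single scaling by base**|digits-n|
-- instead of A's step-by-step rescaling loops; measurably faster when the digit gap is large.


-- ===== PORT A =====
-- `while value < base ** (digits-1): value *= base` (fuel only makes it total; inside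
-- Pre_ the loop needs at most digits.toNat iterations, proved below)
def pvMulLoop (digits base : Int) : Nat → Int → Int
  | 0, value => value
  | f + 1, value =>
      if value < base ^ (digits - 1).toNat then pvMulLoop digits base f (value * base)
      else value

-- `while value >= base ** digits: value //= base` (fuel only makes it total)
def pvDivLoop (digits base : Int) : Nat → Int → Int
  | 0, value => value
  | f + 1, value =>
      if value ≥ base ^ digits.toNat then pvDivLoop digits base f (PySem.Int.floordiv value base)
      else value

-- `raise ValueError` (digits ≤ 0) is excluded by Pre_; the port returns 0 there.
def select_top_digits (value : Int) (digits : Int) (base : Int) : Int :=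
  if digits ≤ 0 then 0
  else pvDivLoop digits base (digits.toNat + value.toNat + 1)
        (pvMulLoop digits base (digits.toNat + value.toNat + 1) value)

-- ===== PORT B =====
-- `n = 0; v = value; while v > 0: v //= base; n += 1` (fuel only makes it total)
def pvCountDigits (base : Int) : Nat → Int → Int
  | 0, _ => 0
  | f + 1, v =>
      if v > 0 then pvCountDigits base f (PySem.Int.floordiv v base) + 1
      else 0

def select_top_digits_alt (value : Int) (digits : Int) (base : Int) : Int :=
  if digits ≤ 0 then 0
  else
    let n := pvCountDigits base (value.toNat + 1) value
    if n ≤ digits then value * base ^ (digits - n).toNat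
    else PySem.Int.floordiv value (base ^ (n - digits).toNat)

-- ===== PRECONDITION & SPEC =====
-- Pre_ excludes digits ≤ 0 (A raises ValueError), base < 2 and value < 1 (there A's loops
-- diverge or divide by zero, except for some negative-base inputs where A's oscillating
-- loop happens to return an accidental sign-flipped value that no caller would specify).
def Pre_select_top_digits (value : Int) (digits : Int) (base : Int) : Prop :=
  1 ≤ value ∧ 1 ≤ digits ∧ 2 ≤ base
instance (value : Int) (digits : Int) (base : Int) : Decidable (Pre_select_top_digits value digits base) := by
  unfold Pre_select_top_digits; infer_instance

def pvWitness_select_top_digits : Int × Int × Int := (314, 2, 10)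

def Spec_select_top_digits (value : Int) (digits : Int) (base : Int) (out : Int) : Prop := out = select_top_digits_alt value digits base
instance (value : Int) (digits : Int) (base : Int) (out : Int) : Decidable (Spec_select_top_digits value digits base out) := by unfold Spec_select_top_digits; infer_instance

-- ===== CLAIM (what is proved, stated in full; the proofs are below) =====
def Claim_equal_select_top_digits : Prop := ∀ (value : Int) (digits : Int) (base : Int), Dom_select_top_digits value digits base → Pre_select_top_digits value digits base → Spec_select_top_digits value digits base (select_top_digits value digits base)

-- ===== LEMMAS AND PROOFS =====

theorem pv_fdiv_fdiv (a b c : Int) (hb : 0 < b) (hc : 0 < c) :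
    PySem.Int.floordiv (PySem.Int.floordiv a b) c = PySem.Int.floordiv a (b*c) := by
  rw [PySem.Int.floordiv_eq_ediv_of_pos hb, PySem.Int.floordiv_eq_ediv_of_pos hc,
      PySem.Int.floordiv_eq_ediv_of_pos (by positivity : (0:Int) < b*c)]
  exact Int.ediv_ediv_of_nonneg (le_of_lt hb)

theorem pv_fdiv_one (a : Int) : PySem.Int.floordiv a 1 = a := by
  rw [PySem.Int.floordiv_eq_ediv_of_pos one_pos]; exact Int.ediv_one a

-- the basic digit-shift step: if base^n ≤ v < base^(n+1) then base^(n-1) ≤ v//base < base^n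
theorem pv_step_lo (base v : Int) (n : Nat) (hb : 2 ≤ base) (h : base ^ (n+1) ≤ v) :
    base ^ n ≤ PySem.Int.floordiv v base := by
  rw [PySem.Int.le_floordiv_iff_mul_le (by omega)]
  calc base ^ n * base = base ^ (n+1) := by ring
    _ ≤ v := h

theorem pv_step_hi (base v : Int) (n : Nat) (hb : 2 ≤ base) (h : v < base ^ (n+1)) :
    PySem.Int.floordiv v base < base ^ n := by
  rw [PySem.Int.floordiv_lt_iff_lt_mul (by omega)]
  calc v < base ^ (n+1) := h
    _ = base ^ n * base := by ring

-- B's counting loop returns the digit count n+1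
theorem pv_count (base : Int) (hb : 2 ≤ base) :
    ∀ (n f : Nat) (v : Int), base ^ n ≤ v → v < base ^ (n+1) → n + 2 ≤ f →
      pvCountDigits base f v = ((n+1 : Nat) : Int) := by
  intro n
  induction n with
  | zero =>
    intro f v h1 h2 hf
    match f, hf with
    | (f'+1+1), _ =>
      simp only [pvCountDigits]
      have hv : v > 0 := by simp at h1; omega
      have h0 : PySem.Int.floordiv v base = 0 := by
        have hlo : (0:Int) ≤ PySem.Int.floordiv v base := by
          rw [PySem.Int.le_floordiv_iff_mul_le (by omega)]; simp at h1 ⊢; omega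
        have hhi : PySem.Int.floordiv v base < 1 := by
          rw [PySem.Int.floordiv_lt_iff_lt_mul (by omega)]; simpa using h2
        omega
      rw [if_pos hv, h0]
      simp
  | succ n ih =>
    intro f v h1 h2 hf
    match f, hf with
    | (f'+1), hf =>
      simp only [pvCountDigits]
      have hbn : (0:Int) < base ^ (n+1) := by positivity
      rw [if_pos (by omega)]
      rw [ih f' (PySem.Int.floordiv v base) (pv_step_lo base v n hb h1)
            (pv_step_hi base v (n+1) hb h2) (by omega)]
      push_cast; ring

-- A's multiply loop: with e = (digits-1).toNat it returns v * base^(e-n)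
theorem pv_mul (digits base : Int) (hb : 2 ≤ base) :
    ∀ (f : Nat) (n : Nat) (v : Int), base ^ n ≤ v → v < base ^ (n+1) →
      (digits-1).toNat - n ≤ f →
      pvMulLoop digits base f v = v * base ^ ((digits-1).toNat - n) := by
  intro f
  induction f with
  | zero =>
    intro n v h1 h2 hf
    have h0 : (digits-1).toNat - n = 0 := by omega
    simp only [pvMulLoop]
    rw [h0, pow_zero, mul_one]
  | succ f ih =>
    intro n v h1 h2 hf
    simp only [pvMulLoop]
    by_cases hc : v < base ^ (digits - 1).toNat
    · rw [if_pos hc]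
      have hne : n < (digits-1).toNat := by
        by_contra hge
        have : base ^ (digits-1).toNat ≤ base ^ n :=
          pow_le_pow_right₀ (by omega) (by omega)
        omega
      have h1' : base ^ (n+1) ≤ v * base := by
        calc base ^ (n+1) = base ^ n * base := by ring
          _ ≤ v * base := by
              apply mul_le_mul_of_nonneg_right h1 (by omega)
      have h2' : v * base < base ^ (n+2) := by
        calc v * base < base ^ (n+1) * base := by
              apply mul_lt_mul_of_pos_right h2 (by omega)
          _ = base ^ (n+2) := by ring
      rw [ih (n+1) (v*base) h1' h2' (by omega)]
      have he : (digits-1).toNat - n = ((digits-1).toNat - (n+1)) + 1 := by omega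
      rw [he]; ring
    · rw [if_neg hc]
      rw [not_lt] at hc
      have hne : (digits-1).toNat ≤ n := by
        by_contra hlt
        have : base ^ (n+1) ≤ base ^ (digits-1).toNat :=
          pow_le_pow_right₀ (by omega) (by omega)
        omega
      have h0 : (digits-1).toNat - n = 0 := by omega
      rw [h0, pow_zero, mul_one]

-- A's divide loop: with D = digits.toNat ≥ 1 it returns v // base^(n+1-D)
theorem pv_div (digits base : Int) (hb : 2 ≤ base) (hd : 1 ≤ digits) :
    ∀ (f : Nat) (n : Nat) (v : Int), base ^ n ≤ v → v < base ^ (n+1) → n ≤ f →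
      pvDivLoop digits base f v = PySem.Int.floordiv v (base ^ (n + 1 - digits.toNat)) := by
  intro f
  induction f with
  | zero =>
    intro n v h1 h2 hf
    have hn : n = 0 := by omega
    have hD : 1 ≤ digits.toNat := by omega
    have h0 : n + 1 - digits.toNat = 0 := by omega
    simp only [pvDivLoop]
    rw [h0, pow_zero, pv_fdiv_one]
  | succ f ih =>
    intro n v h1 h2 hf
    simp only [pvDivLoop]
    by_cases hc : v ≥ base ^ digits.toNat
    · rw [if_pos hc]
      have hDn : digits.toNat ≤ n := by
        by_contra hlt
        have : base ^ (n+1) ≤ base ^ digits.toNat :=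
          pow_le_pow_right₀ (by omega) (by omega)
        omega
      have hn1 : 1 ≤ n := by omega
      match n, hn1 with
      | (n'+1), _ =>
        rw [ih n' (PySem.Int.floordiv v base) (pv_step_lo base v n' hb h1)
              (pv_step_hi base v (n'+1) hb h2) (by omega)]
        rw [pv_fdiv_fdiv v base _ (by omega) (by positivity)]
        congr 1
        have : n' + 1 + 1 - digits.toNat = (n' + 1 - digits.toNat) + 1 := by omega
        rw [this]; ring
    · rw [if_neg hc]
      rw [ge_iff_le, not_le] at hc
      have : n < digits.toNat := by
        by_contra hge
        have : base ^ digits.toNat ≤ base ^ n :=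
          pow_le_pow_right₀ (by omega) (by omega)
        omega
      have h0 : n + 1 - digits.toNat = 0 := by omega
      rw [h0, pow_zero, pv_fdiv_one]


-- ===== VERDICT (by name: the statement is the Claim_ definition above) =====
theorem select_top_digits_spec : Claim_equal_select_top_digits := by
  intro value digits base hDom hPre
  obtain ⟨hv, hd, hb⟩ := hPre
  unfold Spec_select_top_digits
  have hbase : ((base.toNat : Nat) : Int) = base := Int.toNat_of_nonneg (by omega)
  have hval : ((value.toNat : Nat) : Int) = value := Int.toNat_of_nonneg (by omega)
  set n := Nat.log base.toNat value.toNat with hn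
  have h1 : base ^ n ≤ value := by
    calc base ^ n = ((base.toNat ^ n : Nat) : Int) := by push_cast; rw [hbase]
      _ ≤ ((value.toNat : Nat) : Int) := by
          exact_mod_cast Nat.pow_log_le_self base.toNat (by omega)
      _ = value := hval
  have h2 : value < base ^ (n+1) := by
    calc value = ((value.toNat : Nat) : Int) := hval.symm
      _ < ((base.toNat ^ (n+1) : Nat) : Int) := by
          exact_mod_cast Nat.lt_pow_succ_log_self (by omega) value.toNat
      _ = base ^ (n+1) := by push_cast; rw [hbase]
  have hnv : n < value.toNat := by
    have t1 : n < 2 ^ n := Nat.lt_two_pow_self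
    have t2 : 2 ^ n ≤ base.toNat ^ n := Nat.pow_le_pow_left (by omega) n
    have t3 : base.toNat ^ n ≤ value.toNat := Nat.pow_log_le_self base.toNat (by omega)
    omega
  -- A side
  unfold select_top_digits
  rw [if_neg (by omega)]
  rw [pv_mul digits base hb (digits.toNat + value.toNat + 1) n value h1 h2 (by omega)]
  have hw1 : base ^ (n + ((digits-1).toNat - n)) ≤ value * base ^ ((digits-1).toNat - n) := by
    rw [pow_add]
    exact mul_le_mul_of_nonneg_right h1 (by positivity)
  have hw2 : value * base ^ ((digits-1).toNat - n) < base ^ (n + ((digits-1).toNat - n) + 1) := by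
    have : n + ((digits-1).toNat - n) + 1 = (n + 1) + ((digits-1).toNat - n) := by omega
    rw [this, pow_add]
    exact mul_lt_mul_of_pos_right h2 (by positivity)
  rw [pv_div digits base hb hd (digits.toNat + value.toNat + 1)
        (n + ((digits-1).toNat - n)) _ hw1 hw2 (by omega)]
  -- B side
  unfold select_top_digits_alt
  rw [if_neg (by omega)]
  simp only
  rw [pv_count base hb n (value.toNat + 1) value h1 h2 (by omega)]
  by_cases hcase : n + 1 ≤ digits.toNat
  · rw [if_pos (by push_cast; omega)]
    have hA : n + ((digits-1).toNat - n) + 1 - digits.toNat = 0 := by omega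
    have hB : (digits - ((n+1 : Nat) : Int)).toNat = (digits-1).toNat - n := by omega
    rw [hA, hB, pow_zero, pv_fdiv_one]
  · rw [if_neg (by push_cast; omega)]
    have he : (digits-1).toNat - n = 0 := by omega
    rw [he]
    have hA : n + 0 + 1 - digits.toNat = n + 1 - digits.toNat := by omega
    have hB : (((n+1 : Nat) : Int) - digits).toNat = n + 1 - digits.toNat := by omega
    rw [hA, hB, pow_zero, mul_one]
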